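-- pv_equiv track=rewrite | github.com/niamul64/study-4.1 | cse 406/code/Operating system lab/disk scheduling/345/C-SCAN.py | splitQueue
-- ===== SOURCE A (Python) =====
-- def splitQueue(head,array):
--     lower=[]
--     upper=[]
--     for i in array:
--         if i < head :
--             lower.append(i)
--         else:
--             upper.append(i)
--     upper.sort()
--     lower.sort()
--
--
--     return (lower,upper)
-- ===== SOURCE B (Python) =====
-- def splitQueue(head, array):
--     s = sorted(array)
--     idx = sum(1 for x in s if x < head)
--     return (s[:idx], s[idx:])
-- ===== Notes on version B (the rewrite author's own statement) =====
-- stated objective: simpler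
-- what changed: B sorts the whole array once and splits the sorted list at the count of elements below head, instead of A's partition loop followed by two separate sorts.
import Mathlib
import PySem

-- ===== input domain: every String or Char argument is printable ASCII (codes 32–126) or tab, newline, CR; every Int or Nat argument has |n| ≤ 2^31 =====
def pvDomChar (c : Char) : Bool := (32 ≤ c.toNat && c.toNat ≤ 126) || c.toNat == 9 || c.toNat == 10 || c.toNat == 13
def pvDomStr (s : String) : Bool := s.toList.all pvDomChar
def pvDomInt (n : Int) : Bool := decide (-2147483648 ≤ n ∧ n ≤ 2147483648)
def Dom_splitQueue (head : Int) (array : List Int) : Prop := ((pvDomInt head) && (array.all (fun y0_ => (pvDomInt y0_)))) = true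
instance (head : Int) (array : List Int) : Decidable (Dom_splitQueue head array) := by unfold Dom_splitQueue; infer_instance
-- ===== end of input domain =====

-- B sorts the array once and splits the sorted list at the count of elements below head,
-- replacing A's partition loop plus two separate sorts; objective: simpler.


-- ===== PORT A =====
-- the 'for i in array' loop appending into lower/upper
def splitQueueLoop (head : Int) (array : List Int) (lower upper : List Int) :
    List Int × List Int :=
  match array with
  | [] => (lower, upper)
  | i :: rest =>
    if i < head then splitQueueLoop head rest (lower ++ [i]) upper
    else splitQueueLoop head rest lower (upper ++ [i])

def splitQueue (head : Int) (array : List Int) : List Int × List Int :=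
  let p := splitQueueLoop head array [] []
  let upper := PySem.List.sorted p.2 (fun x => x) false
  let lower := PySem.List.sorted p.1 (fun x => x) false
  (lower, upper)

-- ===== PORT B =====
def splitQueue_alt (head : Int) (array : List Int) : List Int × List Int :=
  let s := PySem.List.sorted array (fun x => x) false
  -- sum(1 for x in s if x < head)
  let idx : Int := (s.map (fun x => if x < head then (1 : Int) else 0)).sum
  (PySem.List.slice s none (some idx), PySem.List.slice s (some idx) none)

-- ===== PRECONDITION & SPEC =====
def Spec_splitQueue (head : Int) (array : List Int) (out : List Int × List Int) : Prop := out = splitQueue_alt head array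
instance (head : Int) (array : List Int) (out : List Int × List Int) : Decidable (Spec_splitQueue head array out) := by unfold Spec_splitQueue; infer_instance

-- ===== CLAIM (what is proved, stated in full; the proofs are below) =====
def Claim_equal_splitQueue : Prop := ∀ (head : Int) (array : List Int), Dom_splitQueue head array → Spec_splitQueue head array (splitQueue head array)

-- ===== LEMMAS AND PROOFS =====

theorem splitQueueLoop_eq (head : Int) (array lower upper : List Int) :
    splitQueueLoop head array lower upper =
      (lower ++ array.filter (fun i => decide (i < head)),
       upper ++ array.filter (fun i => !decide (i < head))) := by
  induction array generalizing lower upper with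
  | nil => simp [splitQueueLoop]
  | cons i rest ih =>
    by_cases h : i < head <;> simp [splitQueueLoop, h, ih, List.filter]

-- the sum of the indicator over the sorted list is the length of the lower filter
theorem idx_eq (head : Int) (s : List Int) :
    (s.map (fun x => if x < head then (1 : Int) else 0)).sum =
      ((s.filter (fun i => decide (i < head))).length : Int) := by
  induction s with
  | nil => simp
  | cons a t ih =>
    by_cases h : a < head <;> simp [List.filter, h, ih, Int.add_comm]

-- sorted(array) is sorted(lower-filter) ++ sorted(upper-filter)
theorem sorted_split (head : Int) (array : List Int) :
    PySem.List.sorted array (fun x => x) false =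
      PySem.List.sorted (array.filter (fun i => decide (i < head))) (fun x => x) false ++
      PySem.List.sorted (array.filter (fun i => !decide (i < head))) (fun x => x) false := by
  apply PySem.List.sorted_id_eq_of_perm_of_pairwise
  · exact (List.Perm.append (PySem.List.sorted_perm _ _ _)
      (PySem.List.sorted_perm _ _ _)).trans (List.filter_append_perm _ _)
  · rw [List.pairwise_append]
    refine ⟨PySem.List.sorted_pairwise _ _, PySem.List.sorted_pairwise _ _, ?_⟩
    intro a ha b hb
    rw [PySem.List.mem_sorted] at ha hb
    have ha' := List.of_mem_filter ha
    have hb' := List.of_mem_filter hb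
    simp at ha' hb'
    omega

theorem splitQueue_spec' (head : Int) (array : List Int) :
    splitQueue head array = splitQueue_alt head array := by
  have hlen : (PySem.List.sorted (array.filter (fun i => decide (i < head)))
      (fun x => x) false).length = (array.filter (fun i => decide (i < head))).length :=
    PySem.List.length_sorted _ _ _
  have hcnt : ((PySem.List.sorted array (fun x => x) false).filter
      (fun i => decide (i < head))).length = (array.filter (fun i => decide (i < head))).length := by
    rw [← List.countP_eq_length_filter, ← List.countP_eq_length_filter]
    exact (PySem.List.sorted_perm array (fun x => x) false).countP_eq _
  simp only [splitQueue, splitQueue_alt, splitQueueLoop_eq, List.nil_append, idx_eq,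
    PySem.List.slice_to_natCast, PySem.List.slice_from_natCast]
  rw [hcnt, ← hlen, sorted_split head array, Prod.mk.injEq]
  exact ⟨List.take_left.symm, List.drop_left.symm⟩

-- ===== VERDICT (by name: the statement is the Claim_ definition above) =====
theorem splitQueue_spec : Claim_equal_splitQueue := by
  intro head array _
  exact splitQueue_spec' head array
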